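-- pv_equiv track=rewrite | github.com/RongMonica/FindingOri | main.py | SkewArray
-- ===== SOURCE A (Python) =====
-- def SkewArray(Genome):
--     skew = [0]*(len(Genome) + 1)
--     i = 0
--     for char in Genome:
--         if char == 'G':
--             skew[i+1] = skew[i] + 1
--         elif char == 'C':
--             skew[i+1] = skew[i] - 1
--         else:
--             skew[i+1] = skew[i]
--         i += 1
--     return skew
-- ===== SOURCE B (Python) =====
-- def SkewArray(Genome):
--     # Build the skew array BACK-TO-FRONT: start from the final skew (total G minus
--     # total C) and walk the genome in reverse, undoing each character's contribution.
--     total = Genome.count('G') - Genome.count('C')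
--     out = [total]
--     for char in reversed(Genome):
--         if char == 'G':
--             total -= 1
--         elif char == 'C':
--             total += 1
--         out.append(total)
--     out.reverse()
--     return out
-- ===== Notes on version B (the rewrite author's own statement) =====
-- stated objective: alternative
-- what changed: B builds the skew array back-to-front: it first computes the final skew as Genome.count('G') - Genome.count('C'), then walks the genome in reverse undoing each character's contribution, and reverses the collected list; A fills a preallocated array front-to-back with a fused index loop.
import Mathlib
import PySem

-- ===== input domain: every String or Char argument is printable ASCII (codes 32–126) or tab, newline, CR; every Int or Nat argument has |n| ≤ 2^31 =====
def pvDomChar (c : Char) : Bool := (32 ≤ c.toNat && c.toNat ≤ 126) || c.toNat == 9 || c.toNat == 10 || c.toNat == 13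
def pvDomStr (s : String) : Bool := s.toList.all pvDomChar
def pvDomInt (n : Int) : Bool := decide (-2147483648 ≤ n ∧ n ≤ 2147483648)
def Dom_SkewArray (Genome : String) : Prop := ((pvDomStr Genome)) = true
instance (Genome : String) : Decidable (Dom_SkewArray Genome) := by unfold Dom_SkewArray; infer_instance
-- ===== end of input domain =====

-- B builds the same skew array back-to-front from the genome's total G/C counts instead of A's forward index-updating loop; alternative decomposition, same O(n).
-- ===== PORT A =====
-- skew = [0]*(len(Genome)+1); for char in Genome: skew[i+1] = skew[i] ± 1; i += 1
def skewStep (p : List Int × Nat) (char : Char) : List Int × Nat :=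
  let skew := p.1
  let i := p.2
  let skew :=
    if char = 'G' then skew.set (i+1) (skew.getD i 0 + 1)
    else if char = 'C' then skew.set (i+1) (skew.getD i 0 - 1)
    else skew.set (i+1) (skew.getD i 0)
  (skew, i + 1)

def SkewArray (Genome : String) : List Int :=
  let skew : List Int := List.replicate (Genome.toList.length + 1) 0
  (Genome.toList.foldl skewStep (skew, 0)).1

-- ===== PORT B =====
-- B: total = Genome.count('G') - Genome.count('C'); out = [total];
-- for char in reversed(Genome): undo char's delta, append; out.reverse()
def skewBStep (st : List Int × Int) (char : Char) : List Int × Int :=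
  let total :=
    if char = 'G' then st.2 - 1
    else if char = 'C' then st.2 + 1
    else st.2
  (st.1 ++ [total], total)

def SkewArray_alt (Genome : String) : List Int :=
  let total : Int := (PySem.Str.count Genome "G" : Int) - (PySem.Str.count Genome "C" : Int)
  let p := Genome.toList.reverse.foldl skewBStep ([total], total)
  p.1.reverse

-- ===== PRECONDITION & SPEC =====
def Spec_SkewArray (Genome : String) (out : List Int) : Prop := out = SkewArray_alt Genome
instance (Genome : String) (out : List Int) : Decidable (Spec_SkewArray Genome out) := by unfold Spec_SkewArray; infer_instance

-- ===== CLAIM (what is proved, stated in full; the proofs are below) =====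
def Claim_equal_SkewArray : Prop := ∀ (Genome : String), Dom_SkewArray Genome → Spec_SkewArray Genome (SkewArray Genome)

-- ===== LEMMAS AND PROOFS =====

-- per-character delta, the common yardstick for both proofs
def skewDelta (char : Char) : Int :=
  if char = 'G' then 1 else if char = 'C' then -1 else 0

-- ----- A-side: A's fused loop produces the forward prefix scan of the deltas -----
theorem set_mid (s : List Int) (v w x : Int) (t : List Int) :
    (s ++ v :: w :: t).set (s.length + 1) x = s ++ v :: x :: t := by
  induction s with
  | nil => simp
  | cons a s ih => simp [ih]

theorem skew_loop (rest : List Char) (s : List Int) (v : Int) :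
    (rest.foldl skewStep (s ++ v :: List.replicate rest.length 0, s.length)).1
      = s ++ (rest.map skewDelta).scanl (· + ·) v := by
  induction rest generalizing s v with
  | nil => simp
  | cons c rest ih =>
    have hstep : skewStep (s ++ v :: List.replicate (c :: rest).length 0, s.length) c
        = ((s ++ [v]) ++ (v + skewDelta c) :: List.replicate rest.length 0, (s ++ [v]).length) := by
      simp only [skewStep, skewDelta, List.length_cons, List.replicate_succ]
      split_ifs <;>
        simp [set_mid s v 0 _ (List.replicate rest.length 0)] <;> ring_nf
    rw [List.foldl_cons, hstep, ih (s ++ [v]) (v + skewDelta c)]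
    simp

theorem skewA_eq (Genome : String) :
    SkewArray Genome = (Genome.toList.map skewDelta).scanl (· + ·) 0 := by
  unfold SkewArray
  have h := skew_loop Genome.toList [] 0
  simpa using h

-- ----- B-side: counting, then undoing deltas in reverse -----

-- Python's str.count for a single character is the list count
theorem count_go_singleton (c : Char) :
    ∀ (fuel : Nat) (l : List Char) (acc : Nat), l.length ≤ fuel →
      PySem.Chars.count.go [c] fuel l acc = acc + l.count c := by
  intro fuel
  induction fuel with
  | zero =>
    intro l acc h
    have : l = [] := List.eq_nil_of_length_eq_zero (Nat.le_zero.mp h)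
    subst this; simp [PySem.Chars.count.go]
  | succ n ih =>
    intro l acc h
    cases l with
    | nil => simp [PySem.Chars.count.go]
    | cons x t =>
      simp only [PySem.Chars.count.go]
      have ht : t.length ≤ n := Nat.le_of_succ_le_succ h
      by_cases hx : c = x
      · subst hx
        have hp : ([c].isPrefixOf (c :: t)) = true := by simp [List.isPrefixOf]
        rw [if_pos hp]
        simp only [List.length_cons, List.drop_succ_cons, List.length_nil, List.drop_zero]
        rw [ih t (acc + 1) ht, List.count_cons_self]
        omega
      · have hp : ([c].isPrefixOf (x :: t)) = false := by
          simp [List.isPrefixOf]; exact fun hcx => hx hcx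
        rw [if_neg (by simp [hp])]
        rw [ih t acc ht, List.count_cons]
        simp [Ne.symm hx]

theorem str_count_char (s : String) (c : Char) (sub : String) (h : sub.toList = [c]) :
    PySem.Str.count s sub = s.toList.count c := by
  simp only [PySem.Str.count, h, PySem.Chars.count]
  have he : ([c] : List Char).isEmpty = false := rfl
  rw [he]
  simpa using count_go_singleton c s.toList.length s.toList 0 le_rfl

-- counts determine the sum of the deltas
theorem sum_delta_eq_counts (l : List Char) :
    (l.map skewDelta).sum = (l.count 'G' : Int) - (l.count 'C' : Int) := by
  induction l with
  | nil => simp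
  | cons x t ih =>
    simp only [List.map_cons, List.sum_cons, List.count_cons, ih, skewDelta]
    by_cases hG : x = 'G'
    · subst hG; simp; omega
    · by_cases hC : x = 'C'
      · subst hC; simp; omega
      · simp [hG, hC]

-- every scanl starts with its seed
theorem scanl_head {α β : Type} (f : β → α → β) (b : β) (l : List α) :
    l.scanl f b = b :: (l.scanl f b).tail := by
  cases l <;> simp

-- B's step subtracts the character's delta
theorem skewBStep_eq (st : List Int × Int) (c : Char) :
    skewBStep st c = (st.1 ++ [st.2 - skewDelta c], st.2 - skewDelta c) := by
  simp only [skewBStep, skewDelta]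
  split_ifs <;> simp

-- B's fold collects the backward scan
theorem skewB_fold (l : List Char) :
    ∀ (acc : List Int) (t : Int),
      (l.foldl skewBStep (acc, t)).1
        = acc ++ (l.scanl (fun a c => a - skewDelta c) t).tail := by
  induction l with
  | nil => intro acc t; simp
  | cons c rest ih =>
    intro acc t
    rw [List.foldl_cons, skewBStep_eq]
    rw [ih (acc ++ [t - skewDelta c]) (t - skewDelta c)]
    rw [List.scanl_cons, List.tail_cons,
        scanl_head (fun a c => a - skewDelta c) (t - skewDelta c) rest]
    simp

theorem scanl_concat {α β : Type} (f : β → α → β) (a : β) (xs : List α) (y : α) :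
    (xs ++ [y]).scanl f a = xs.scanl f a ++ [f (xs.foldl f a) y] := by
  induction xs generalizing a with
  | nil => simp
  | cons x xs ih => simp [List.scanl_cons, ih]

theorem foldl_sub_delta (xs : List Char) (t : Int) :
    xs.foldl (fun a c => a - skewDelta c) t = t - (xs.map skewDelta).sum := by
  induction xs generalizing t with
  | nil => simp
  | cons x xs ih => simp [ih]; ring

-- backward scan of the reverse is the reverse of the forward scan
theorem scan_reverse (l : List Char) :
    ∀ (t : Int),
      l.reverse.scanl (fun a c => a - skewDelta c) t
        = ((l.map skewDelta).scanl (· + ·) (t - (l.map skewDelta).sum)).reverse := by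
  induction l with
  | nil => intro t; simp
  | cons c rest ih =>
    intro t
    rw [List.reverse_cons, scanl_concat, ih t, foldl_sub_delta]
    have h1 : (rest.reverse.map skewDelta).sum = (rest.map skewDelta).sum := by
      rw [List.map_reverse, List.sum_reverse]
    simp only [List.map_cons, List.sum_cons, List.scanl_cons, List.reverse_cons, h1]
    have h2 : t - (skewDelta c + (rest.map skewDelta).sum) + skewDelta c
        = t - (rest.map skewDelta).sum := by ring
    rw [h2]
    congr 1
    ring

theorem skewB_eq (Genome : String) :
    SkewArray_alt Genome = (Genome.toList.map skewDelta).scanl (· + ·) 0 := by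
  have hT : ((PySem.Str.count Genome "G" : Int) - (PySem.Str.count Genome "C" : Int))
      = (Genome.toList.map skewDelta).sum := by
    rw [str_count_char Genome 'G' "G" rfl, str_count_char Genome 'C' "C" rfl]
    exact (sum_delta_eq_counts Genome.toList).symm
  show ((Genome.toList.reverse.foldl skewBStep
      ([(PySem.Str.count Genome "G" : Int) - (PySem.Str.count Genome "C" : Int)],
       (PySem.Str.count Genome "G" : Int) - (PySem.Str.count Genome "C" : Int))).1).reverse
    = (Genome.toList.map skewDelta).scanl (· + ·) 0
  rw [hT, skewB_fold, List.singleton_append, ← scanl_head, scan_reverse, List.reverse_reverse]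
  simp

-- ===== VERDICT (by name: the statement is the Claim_ definition above) =====
theorem SkewArray_spec : Claim_equal_SkewArray := by
  intro Genome _
  unfold Spec_SkewArray
  rw [skewA_eq, skewB_eq]
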